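-- pv_equiv track=rewrite | github.com/Eckreh/BHN-Tool | helper_functions.py | slice_array
-- ===== SOURCE A (Python) =====
-- def slice_array(array1, array2):
--     """
--     Slices elements from array1 based on the positions marked as 1 in array2.
--
--     Parameters
--     ----------
--         array1 : list
--             The original list from which elements will be sliced.
--         array2 : list
--             A binary indicator list where 1 represents the positions
--             where elements should be sliced from array1.
--
--     Returns
--     ----------
--         list
--             A list containing slices of elements from array1 based on the positions
--             marked as 1 in array2. Each slice is represented as a sublist.
--
--     Example
--     ----------
--
--     >>> array1 = [1, 2, 3, 4, 5, 6, 7, 8, 9]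
--     >>> array2 = [0, 1, 1, 0, 0, 1, 1, 0, 0]
--     >>> sliced_arrays = slice_array(array1, array2)
--     [[2, 3], [6, 7]]
--     """
--     slices = []
--     current_slice = []
--
--     for index, value in enumerate(array2):
--         if value == 1:
--             current_slice.append(array1[index])
--         elif current_slice:
--             slices.append(current_slice)
--             current_slice = []
--
--     if current_slice:
--         slices.append(current_slice)
--
--     return slices
-- ===== SOURCE B (Python) =====
-- def slice_array(array1, array2):
--     intervals = []
--     start = None
--     for index, value in enumerate(array2):
--         if value == 1:
--             if start is None:
--                 start = index
--         elif start is not None: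
--             intervals.append((start, index))
--             start = None
--     if start is not None:
--         intervals.append((start, len(array2)))
--     return [[array1[i] for i in range(s, e)] for (s, e) in intervals]
-- ===== Notes on version B (the rewrite author's own statement) =====
-- stated objective: alternative
-- what changed: B first builds the list of (start,end) index intervals of maximal runs of 1s in array2, then in a second pass materialises each slice by indexing array1 per index; A accumulates a current slice of values and flushes it while scanning.
import Mathlib
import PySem

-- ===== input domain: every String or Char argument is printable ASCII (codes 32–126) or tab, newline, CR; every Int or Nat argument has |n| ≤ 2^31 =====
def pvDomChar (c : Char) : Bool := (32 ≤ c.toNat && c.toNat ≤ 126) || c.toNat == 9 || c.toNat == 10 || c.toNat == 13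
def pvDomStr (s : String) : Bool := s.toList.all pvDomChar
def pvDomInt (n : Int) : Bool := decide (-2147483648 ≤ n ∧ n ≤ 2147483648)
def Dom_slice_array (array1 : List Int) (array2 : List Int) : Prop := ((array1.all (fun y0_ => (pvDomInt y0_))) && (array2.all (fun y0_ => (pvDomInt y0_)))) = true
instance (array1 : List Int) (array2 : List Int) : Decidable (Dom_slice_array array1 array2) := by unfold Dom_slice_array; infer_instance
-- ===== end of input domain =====

-- B builds (start,end) intervals of maximal 1-runs in array2 first, then extracts each slice from array1 by per-index access; same O(n) cost, different decomposition.


-- ===== PORT A =====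
-- A's loop over enumerate(array2): state (slices, current_slice); array1[index] is
-- PySem.List.pyGet? (none = IndexError, excluded by Pre_; .getD 0 is unreachable inside Pre_).
def sliceArrayLoopA (array1 : List Int) (index : Nat) (rest : List Int)
    (slices : List (List Int)) (cur : List Int) : List (List Int) :=
  match rest with
  | [] => if cur = [] then slices else slices ++ [cur]
  | v :: rest' =>
    if v = 1 then
      sliceArrayLoopA array1 (index + 1) rest' slices
        (cur ++ [(PySem.List.pyGet? array1 (index : Int)).getD 0])
    else if cur = [] then
      sliceArrayLoopA array1 (index + 1) rest' slices cur
    else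
      sliceArrayLoopA array1 (index + 1) rest' (slices ++ [cur]) []

def slice_array (array1 : List Int) (array2 : List Int) : List (List Int) :=
  sliceArrayLoopA array1 0 array2 [] []

-- ===== PORT B =====
-- Phase 1: collect the (start, end) intervals of maximal runs of 1s in array2.
def sliceArrayIntervals (index : Nat) (rest : List Int)
    (acc : List (Nat × Nat)) (start : Option Nat) : List (Nat × Nat) :=
  match rest with
  | [] => match start with
          | none => acc
          | some s => acc ++ [(s, index)]
  | v :: rest' =>
    if v = 1 then
      match start with
      | none => sliceArrayIntervals (index + 1) rest' acc (some index)
      | some s => sliceArrayIntervals (index + 1) rest' acc (some s)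
    else
      match start with
      | none => sliceArrayIntervals (index + 1) rest' acc none
      | some s => sliceArrayIntervals (index + 1) rest' (acc ++ [(s, index)]) none

-- Phase 2: [[array1[i] for i in range(s, e)] for (s, e) in intervals]
def slice_array_alt (array1 : List Int) (array2 : List Int) : List (List Int) :=
  (sliceArrayIntervals 0 array2 [] none).map
    (fun p => (List.range' p.1 (p.2 - p.1)).map
      (fun (i : Nat) => (PySem.List.pyGet? array1 (i : Int)).getD 0))

-- ===== PRECONDITION & SPEC =====
-- A raises IndexError iff array2 has a 1 at an index ≥ len(array1); Pre_ excludes exactly those inputs.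
def Pre_slice_array (array1 : List Int) (array2 : List Int) : Prop :=
  ∀ p ∈ array2.zipIdx, p.1 = 1 → p.2 < array1.length
instance (array1 : List Int) (array2 : List Int) : Decidable (Pre_slice_array array1 array2) := by unfold Pre_slice_array; infer_instance
def pvWitness_slice_array : List Int × List Int := ([1, 2, 3, 4], [0, 1, 1, 0])

def Spec_slice_array (array1 : List Int) (array2 : List Int) (out : List (List Int)) : Prop := out = slice_array_alt array1 array2
instance (array1 : List Int) (array2 : List Int) (out : List (List Int)) : Decidable (Spec_slice_array array1 array2 out) := by unfold Spec_slice_array; infer_instance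

-- ===== CLAIM (what is proved, stated in full; the proofs are below) =====
def Claim_equal_slice_array : Prop := ∀ (array1 : List Int) (array2 : List Int), Dom_slice_array array1 array2 → Pre_slice_array array1 array2 → Spec_slice_array array1 array2 (slice_array array1 array2)

-- ===== LEMMAS AND PROOFS =====

-- the slice that phase 2 extracts for an interval (s, e)
def sliceExtract (array1 : List Int) (s e : Nat) : List Int :=
  (List.range' s (e - s)).map (fun (i : Nat) => (PySem.List.pyGet? array1 (i : Int)).getD 0)

lemma sliceExtract_snoc (array1 : List Int) (s i : Nat) (h : s ≤ i) :
    sliceExtract array1 s i ++ [(PySem.List.pyGet? array1 (i : Int)).getD 0]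
      = sliceExtract array1 s (i + 1) := by
  unfold sliceExtract
  have h1 : i + 1 - s = (i - s) + 1 := by omega
  have h2 : s + (i - s) = i := by omega
  rw [h1, List.range'_1_concat, List.map_append, h2]
  simp

lemma sliceExtract_ne_nil (array1 : List Int) (s i : Nat) (h : s < i) :
    sliceExtract array1 s i ≠ [] := by
  unfold sliceExtract
  simp only [ne_eq, List.map_eq_nil_iff, List.range'_eq_nil_iff]
  omega

-- Invariant linking A's state (slices, cur) to B's state (acc, start).
lemma loopA_eq_intervals (array1 : List Int) (rest : List Int) :
    ∀ (i : Nat) (acc : List (Nat × Nat)) (start : Option Nat) (cur : List Int),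
    (start = none → cur = []) →
    (∀ s, start = some s → s < i ∧ cur = sliceExtract array1 s i) →
    sliceArrayLoopA array1 i rest (acc.map (fun p => sliceExtract array1 p.1 p.2)) cur
      = (sliceArrayIntervals i rest acc start).map (fun p => sliceExtract array1 p.1 p.2) := by
  induction rest with
  | nil =>
    intro i acc start cur hnone hsome
    cases start with
    | none => simp [sliceArrayLoopA, sliceArrayIntervals, hnone rfl]
    | some s =>
      obtain ⟨hs, hc⟩ := hsome s rfl
      simp [sliceArrayLoopA, sliceArrayIntervals, hc,
        sliceExtract_ne_nil array1 s i hs]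
  | cons v rest' ih =>
    intro i acc start cur hnone hsome
    by_cases hv : v = 1
    · cases start with
      | none =>
        have hc := hnone rfl
        subst hc
        simp only [sliceArrayLoopA, sliceArrayIntervals, hv, List.nil_append]
        exact ih (i + 1) acc (some i) _ (by simp)
          (by rintro s h
              injection h with h
              subst h
              refine ⟨Nat.lt_succ_self i, ?_⟩
              simp [sliceExtract])
      | some s =>
        obtain ⟨hs, hc⟩ := hsome s rfl
        simp only [sliceArrayLoopA, sliceArrayIntervals, hv]
        exact ih (i + 1) acc (some s) _ (by simp)
          (by rintro s' hs'
              injection hs' with hs'; subst hs'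
              exact ⟨Nat.lt_succ_of_lt hs,
                by rw [hc, sliceExtract_snoc array1 s i (Nat.le_of_lt hs)]⟩)
    · cases start with
      | none =>
        have hc := hnone rfl
        subst hc
        simp only [sliceArrayLoopA, sliceArrayIntervals, if_neg hv]
        exact ih (i + 1) acc none [] (fun _ => rfl) (by simp)
      | some s =>
        obtain ⟨hs, hc⟩ := hsome s rfl
        simp only [sliceArrayLoopA, sliceArrayIntervals, if_neg hv]
        rw [if_neg (by rw [hc]; exact sliceExtract_ne_nil array1 s i hs)]
        have h := ih (i + 1) (acc ++ [(s, i)]) none [] (fun _ => rfl) (by simp)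
        simpa [hc] using h

-- ===== VERDICT (by name: the statement is the Claim_ definition above) =====
theorem slice_array_spec : Claim_equal_slice_array := by
  intro array1 array2 _ _
  unfold Spec_slice_array slice_array slice_array_alt
  simpa only [sliceExtract, List.map_nil] using
    loopA_eq_intervals array1 array2 0 [] none [] (fun _ => rfl) (by simp)
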